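-- pv_equiv track=rewrite | github.com/jd-aig/nlp_baai | jddc2020_baseline/mddr/mddr_recall.py | get_last_text_question
-- ===== SOURCE A (Python) =====
-- def get_last_text_question(ctx):
--     ques_list = list()
--     for item in ctx:
--         if item.startswith('Q:'):
--             item = item.replace('Q:', '')
--             ques_list.append(item)
--     if ques_list:
--         last_q = ques_list[-1]
--     else:
--         last_q = ''
--     return last_q
-- ===== SOURCE B (Python) =====
-- def get_last_text_question(ctx):
--     for item in reversed(ctx):
--         if item.startswith('Q:'):
--             return item.replace('Q:', '')
--     return ''
-- ===== Notes on version B (the rewrite author's own statement) =====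
-- stated objective: simpler
-- what changed: Replaces the accumulator-list forward scan with a backward scan over reversed(ctx) that returns immediately at the first match, maintaining no list at all.
import Mathlib
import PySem

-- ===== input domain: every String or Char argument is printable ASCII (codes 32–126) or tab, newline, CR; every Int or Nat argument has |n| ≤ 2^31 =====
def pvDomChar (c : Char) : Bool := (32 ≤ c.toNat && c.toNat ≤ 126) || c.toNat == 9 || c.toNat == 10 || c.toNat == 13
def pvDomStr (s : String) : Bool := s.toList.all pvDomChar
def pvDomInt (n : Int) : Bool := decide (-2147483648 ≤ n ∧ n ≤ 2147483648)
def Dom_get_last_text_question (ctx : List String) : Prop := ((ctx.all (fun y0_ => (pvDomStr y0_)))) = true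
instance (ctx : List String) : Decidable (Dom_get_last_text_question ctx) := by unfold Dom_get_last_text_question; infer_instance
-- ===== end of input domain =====

-- ===== PORT A =====
-- A: forward scan appending stripped questions, then take the last (or '').
def get_last_text_question (ctx : List String) : String :=
  let ques_list := ctx.foldl (fun acc item =>
    if PySem.Str.startswith item "Q:" then acc ++ [PySem.Str.replace item "Q:" ""] else acc) []
  if ques_list ≠ [] then (PySem.List.pyGet? ques_list (-1)).getD "" else ""

-- ===== PORT B =====
-- B: scan from the end, return at the first match; no accumulator.
def altLoop : List String → String
  | [] => ""
  | item :: rest =>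
    if PySem.Str.startswith item "Q:" then PySem.Str.replace item "Q:" "" else altLoop rest

def get_last_text_question_alt (ctx : List String) : String := altLoop ctx.reverse

-- ===== PRECONDITION & SPEC =====
def Spec_get_last_text_question (ctx : List String) (out : String) : Prop := out = get_last_text_question_alt ctx
instance (ctx : List String) (out : String) : Decidable (Spec_get_last_text_question ctx out) := by unfold Spec_get_last_text_question; infer_instance

-- ===== CLAIM (what is proved, stated in full; the proofs are below) =====
def Claim_equal_get_last_text_question : Prop := ∀ (ctx : List String), Dom_get_last_text_question ctx → Spec_get_last_text_question ctx (get_last_text_question ctx)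

-- ===== LEMMAS AND PROOFS =====

-- ===== VERDICT (by name: the statement is the Claim_ definition above) =====
theorem pyGet_append_neg_one (xs : List String) (a : String) :
    PySem.List.pyGet? (xs ++ [a]) (-1) = some a := by
  simp [PySem.List.pyGet?, PySem.List.pyIdx?]

theorem main_eq (ctx : List String) :
    get_last_text_question ctx = get_last_text_question_alt ctx := by
  unfold get_last_text_question get_last_text_question_alt
  rw [PySem.List.foldl_append_if]
  induction ctx using List.reverseRecOn with
  | nil => simp [altLoop]
  | append_singleton l x ih =>
      rw [List.reverse_append, List.reverse_singleton, List.singleton_append]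
      simp only [List.nil_append, List.filter_append, List.map_append,
        List.filter_singleton, List.map_cons, List.map_nil, altLoop] at *
      by_cases hx : PySem.Str.startswith x "Q:" = true
      · simp only [PySem.Str.startswith_eq, show "Q:".toList = ['Q', ':'] from rfl] at hx
        simp [hx, pyGet_append_neg_one]
      · simp only [hx, if_neg, Bool.false_eq_true, not_false_iff, if_false,
          List.append_nil]
        simpa [hx] using ih

theorem get_last_text_question_spec : Claim_equal_get_last_text_question := by
  intro ctx _
  unfold Spec_get_last_text_question
  exact main_eq ctx
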